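-- pv_equiv track=rewrite | github.com/afkanpour/benchmarking-contrastive | MedMultiModal/src/clip_benchmark/dataset/medical_datasets.py | _build_label
-- ===== SOURCE A (Python) =====
-- def _build_label(str_label):
--     classes = [
--             "Mass",
--             "Suspicious Calcification",
--             "Asymmetry",
--             "Focal Asymmetry",
--             "Global Asymmetry",
--             "Architectural Distortion",
--             "Skin Thickening",
--             "Skin Retraction",
--             "Nipple Retraction",
--             "Suspicious Lymph Node"
--     ]
--     str_label = str_label[2:-2].split("', '")
--     return [1 if lbl in str_label else 0 for lbl in classes]
-- ===== SOURCE B (Python) =====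
-- def _build_label(str_label):
--     classes = [
--             "Mass",
--             "Suspicious Calcification",
--             "Asymmetry",
--             "Focal Asymmetry",
--             "Global Asymmetry",
--             "Architectural Distortion",
--             "Skin Thickening",
--             "Skin Retraction",
--             "Nipple Retraction",
--             "Suspicious Lymph Node"
--     ]
--     index = {c: i for i, c in enumerate(classes)}
--     result = [0] * len(classes)
--     for lbl in str_label[2:-2].split("', '"):
--         if lbl in index:
--             result[index[lbl]] = 1
--     return result
-- ===== Notes on version B (the rewrite author's own statement) =====
-- stated objective: alternative
-- what changed: Instead of mapping over the ten classes and scanning the parsed label list for each, B builds a name-to-position index dict once, initialises a zero vector, and makes a single pass over the parsed labels setting the bit at each recognised label's index.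
import Mathlib
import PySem

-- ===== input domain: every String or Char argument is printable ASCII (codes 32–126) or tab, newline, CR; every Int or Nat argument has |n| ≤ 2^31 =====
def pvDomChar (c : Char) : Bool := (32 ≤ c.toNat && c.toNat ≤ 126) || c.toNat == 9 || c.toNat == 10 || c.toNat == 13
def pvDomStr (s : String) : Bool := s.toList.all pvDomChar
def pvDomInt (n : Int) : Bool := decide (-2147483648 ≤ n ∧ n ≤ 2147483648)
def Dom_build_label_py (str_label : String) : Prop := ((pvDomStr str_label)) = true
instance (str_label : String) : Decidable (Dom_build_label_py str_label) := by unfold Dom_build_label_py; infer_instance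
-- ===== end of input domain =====

-- B replaces A's per-class membership scan of the parsed list by one pass over the parsed
-- labels with a precomputed name→position index, setting bits in a zero vector (objective: alternative).

-- ===== PORT A =====
-- the fixed class vocabulary (identical literal in both Pythons)
def pvClasses : List String := ["Mass", "Suspicious Calcification", "Asymmetry",
  "Focal Asymmetry", "Global Asymmetry", "Architectural Distortion", "Skin Thickening",
  "Skin Retraction", "Nipple Retraction", "Suspicious Lymph Node"]

def build_label_py (str_label : String) : List Int :=
  -- str.split with the nonempty literal sep never raises: split? is some here, .getD [] just unwraps
  let parsed := (PySem.Str.split? (PySem.Str.slice str_label (some 2) (some (-2))) "', '").getD []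
  pvClasses.map (fun lbl => if lbl ∈ parsed then (1 : Int) else 0)

-- ===== PORT B =====
-- index = {c: i for i, c in enumerate(classes)}
def pvIndex : PySem.Dict String Int :=
  PySem.Dict.ofList ((PySem.List.enumerate pvClasses 0).map (fun p => (p.2, p.1)))

-- the loop body: if lbl in index: result[index[lbl]] = 1   (index values are 0..9, so .toNat is exact)
def pvStep (result : List Int) (lbl : String) : List Int :=
  match pvIndex.get? lbl with
  | some i => result.set i.toNat 1
  | none => result

def build_label_py_alt (str_label : String) : List Int :=
  ((PySem.Str.split? (PySem.Str.slice str_label (some 2) (some (-2))) "', '").getD []).foldl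
    pvStep (List.replicate pvClasses.length 0)

-- ===== PRECONDITION & SPEC =====
def Spec_build_label_py (str_label : String) (out : List Int) : Prop := out = build_label_py_alt str_label
instance (str_label : String) (out : List Int) : Decidable (Spec_build_label_py str_label out) := by unfold Spec_build_label_py; infer_instance

-- ===== CLAIM (what is proved, stated in full; the proofs are below) =====
def Claim_equal_build_label_py : Prop := ∀ (str_label : String), Dom_build_label_py str_label → Spec_build_label_py str_label (build_label_py str_label)

-- ===== LEMMAS AND PROOFS =====

-- one pvStep on the membership vector of `acc` yields the membership vector of `acc ++ [x]`
theorem pvStep_map (acc : List String) (x : String) :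
    pvStep (pvClasses.map (fun c => if c ∈ acc then (1:Int) else 0)) x
      = pvClasses.map (fun c => if c ∈ acc ++ [x] then (1:Int) else 0) := by
  by_cases h0 : x = "Mass"
  · subst h0; have h : pvIndex.get? "Mass" = some 0 := by decide
    simp [pvStep, h, pvClasses, List.mem_append]
  by_cases h1 : x = "Suspicious Calcification"
  · subst h1; have h : pvIndex.get? "Suspicious Calcification" = some 1 := by decide
    simp [pvStep, h, pvClasses, List.mem_append]
  by_cases h2 : x = "Asymmetry"
  · subst h2; have h : pvIndex.get? "Asymmetry" = some 2 := by decide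
    simp [pvStep, h, pvClasses, List.mem_append]
  by_cases h3 : x = "Focal Asymmetry"
  · subst h3; have h : pvIndex.get? "Focal Asymmetry" = some 3 := by decide
    simp [pvStep, h, pvClasses, List.mem_append]
  by_cases h4 : x = "Global Asymmetry"
  · subst h4; have h : pvIndex.get? "Global Asymmetry" = some 4 := by decide
    simp [pvStep, h, pvClasses, List.mem_append]
  by_cases h5 : x = "Architectural Distortion"
  · subst h5; have h : pvIndex.get? "Architectural Distortion" = some 5 := by decide
    simp [pvStep, h, pvClasses, List.mem_append]
  by_cases h6 : x = "Skin Thickening"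
  · subst h6; have h : pvIndex.get? "Skin Thickening" = some 6 := by decide
    simp [pvStep, h, pvClasses, List.mem_append]
  by_cases h7 : x = "Skin Retraction"
  · subst h7; have h : pvIndex.get? "Skin Retraction" = some 7 := by decide
    simp [pvStep, h, pvClasses, List.mem_append]
  by_cases h8 : x = "Nipple Retraction"
  · subst h8; have h : pvIndex.get? "Nipple Retraction" = some 8 := by decide
    simp [pvStep, h, pvClasses, List.mem_append]
  by_cases h9 : x = "Suspicious Lymph Node"
  · subst h9; have h : pvIndex.get? "Suspicious Lymph Node" = some 9 := by decide
    simp [pvStep, h, pvClasses, List.mem_append]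
  · have h : pvIndex.get? x = none := by
      have hd : pvIndex = PySem.Dict.mk [("Mass", 0), ("Suspicious Calcification", 1),
        ("Asymmetry", 2), ("Focal Asymmetry", 3), ("Global Asymmetry", 4),
        ("Architectural Distortion", 5), ("Skin Thickening", 6), ("Skin Retraction", 7),
        ("Nipple Retraction", 8), ("Suspicious Lymph Node", 9)] := by decide
      rw [hd]
      simp [Ne.symm h0, Ne.symm h1, Ne.symm h2, Ne.symm h3, Ne.symm h4,
        Ne.symm h5, Ne.symm h6, Ne.symm h7, Ne.symm h8, Ne.symm h9, PySem.Dict.get?]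
    simp [pvStep, h, pvClasses, List.mem_append, Ne.symm h0, Ne.symm h1, Ne.symm h2,
      Ne.symm h3, Ne.symm h4, Ne.symm h5, Ne.symm h6, Ne.symm h7, Ne.symm h8, Ne.symm h9]

-- folding pvStep over `parsed` starting from the membership vector of `acc`
theorem pvFold_map (parsed acc : List String) :
    parsed.foldl pvStep (pvClasses.map (fun c => if c ∈ acc then (1:Int) else 0))
      = pvClasses.map (fun c => if c ∈ acc ++ parsed then (1:Int) else 0) := by
  induction parsed generalizing acc with
  | nil => simp
  | cons x rest ih =>
    rw [List.foldl_cons, pvStep_map, ih (acc ++ [x])]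
    simp

-- A's comprehension over the classes equals B's fold over the parsed labels, for ANY parsed list
theorem pvKey (parsed : List String) :
    pvClasses.map (fun lbl => if lbl ∈ parsed then (1 : Int) else 0)
      = parsed.foldl pvStep (List.replicate pvClasses.length 0) := by
  have h0 : List.replicate pvClasses.length (0:Int)
      = pvClasses.map (fun c => if c ∈ ([] : List String) then (1:Int) else 0) := by decide
  rw [h0, pvFold_map parsed []]
  simp

-- ===== VERDICT (by name: the statement is the Claim_ definition above) =====
theorem build_label_py_spec : Claim_equal_build_label_py :=
  fun _ _ => pvKey _
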